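-- pv_equiv track=rewrite | github.com/DanielWhitehurst02/stealthyRobotSearch | supercover_line.py | supercover_line
-- ===== SOURCE A (Python) =====
-- def supercover_line(p0, p1):
--     dx = p1[0]-p0[0]
--     dy = p1[1]-p0[1]
--     nx = abs(dx)
--     ny = abs(dy)
--     sign_x = 1 if dx > 0 else -1
--     sign_y = 1 if dy > 0 else -1
--
--     p = [p0[0], p0[1]]
--     points = []
--     ix = 0
--     iy = 0
--
--     while (ix < nx or iy < ny):
--
--         decision = (1 + 2*ix) * ny - (1 + 2*iy) * nx
--         if (decision == 0):
--             # next step is diagonal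
--             p[0] += sign_x
--             p[1] += sign_y
--             ix += 1
--             iy += 1
--         elif (decision < 0):
--             # next step is horizontal
--             p[0] += sign_x
--             ix += 1
--         else:
--             # next step is vertical
--             p[1] += sign_y
--             iy += 1
--
--         points.append((p[0],p[1]))
--     return points
-- ===== SOURCE B (Python) =====
-- def supercover_line(p0, p1):
--     dx = p1[0] - p0[0]
--     dy = p1[1] - p0[1]
--     nx = abs(dx)
--     ny = abs(dy)
--     sign_x = 1 if dx > 0 else -1
--     sign_y = 1 if dy > 0 else -1
--
--     # Column-driven algorithm: for each vertical grid line i, the number of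
--     # horizontal grid lines crossed strictly before it is obtained in closed
--     # form by floor division (count of j with (2j+1)*nx < (2i+1)*ny); the
--     # crossing is diagonal exactly when (2i+1)*ny is an odd multiple of nx,
--     # detected by a modulus test.  No per-step decision comparison is made.
--     x, y = p0[0], p0[1]
--     points = []
--     j = 0
--     for i in range(nx):
--         key = (2 * i + 1) * ny
--         jv = (key + nx - 1) // (2 * nx)
--         while j < jv:
--             j += 1
--             y += sign_y
--             points.append((x, y))
--         x += sign_x
--         if key % (2 * nx) == nx:
--             j += 1
--             y += sign_y
--         points.append((x, y))
--     while j < ny: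
--         j += 1
--         y += sign_y
--         points.append((x, y))
--     return points
-- ===== Notes on version B (the rewrite author's own statement) =====
-- stated objective: alternative
-- what changed: Replaces the per-step decision comparison of the merge walk by a column-driven algorithm: for each vertical grid line it computes in closed form (floor division) how many horizontal crossings precede it, emits that run of vertical steps, and detects a diagonal crossing by a modulus test instead of an equality of incrementally tracked quantities.
import Mathlib
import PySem

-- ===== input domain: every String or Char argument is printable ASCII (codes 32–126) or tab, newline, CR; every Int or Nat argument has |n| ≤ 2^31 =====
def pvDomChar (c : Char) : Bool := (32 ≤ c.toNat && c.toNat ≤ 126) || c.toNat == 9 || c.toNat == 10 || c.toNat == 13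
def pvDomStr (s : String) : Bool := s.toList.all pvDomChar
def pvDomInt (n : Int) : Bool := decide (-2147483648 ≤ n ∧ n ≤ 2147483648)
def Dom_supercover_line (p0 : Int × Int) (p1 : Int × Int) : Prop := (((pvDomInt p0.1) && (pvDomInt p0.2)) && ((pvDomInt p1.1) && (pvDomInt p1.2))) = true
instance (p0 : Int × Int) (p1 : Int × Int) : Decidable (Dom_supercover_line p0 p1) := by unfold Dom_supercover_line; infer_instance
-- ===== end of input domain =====

-- B replaces A's per-step decision walk by a column-driven algorithm: a closed-form
-- floor division gives the number of vertical steps before each column crossing and a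
-- modulus test detects diagonal crossings; alternative decomposition, same O(nx+ny) cost.

-- ===== PORT A =====
-- A's while loop, step for step; fuel is only a totality guard (the loop runs at
-- most nx+ny iterations), the body is literal.
def loopA (nx ny : Nat) (sx sy : Int) : Nat → Int → Int → Int → Int → List (Int × Int)
  | 0, _, _, _, _ => []
  | fuel + 1, x, y, ix, iy =>
    if ix < (nx:Int) ∨ iy < (ny:Int) then
      let d := (1 + 2*ix) * (ny:Int) - (1 + 2*iy) * (nx:Int)
      if d = 0 then
        (x + sx, y + sy) :: loopA nx ny sx sy fuel (x + sx) (y + sy) (ix + 1) (iy + 1)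
      else if d < 0 then
        (x + sx, y) :: loopA nx ny sx sy fuel (x + sx) y (ix + 1) iy
      else
        (x, y + sy) :: loopA nx ny sx sy fuel x (y + sy) ix (iy + 1)
    else []

def supercover_line (p0 : Int × Int) (p1 : Int × Int) : List (Int × Int) :=
  let dx := p1.1 - p0.1
  let dy := p1.2 - p0.2
  let nx := dx.natAbs
  let ny := dy.natAbs
  let sign_x : Int := if dx > 0 then 1 else -1
  let sign_y : Int := if dy > 0 then 1 else -1
  loopA nx ny sign_x sign_y (nx + ny) p0.1 p0.2 0 0

-- ===== PORT B =====
-- B's inner 'while j < jv' loop (also the trailing 'while j < ny' loop, with jv = ny):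
-- emits the run of vertical-step points, returns (points, final y, final j)
def loopVert (sy x : Int) : Int → Int → Int → List (Int × Int) × Int × Int
  | y, j, jv =>
    if j < jv then
      let r := loopVert sy x (y + sy) (j + 1) jv
      ((x, y + sy) :: r.1, r.2)
    else ([], y, j)
termination_by y j jv => (jv - j).toNat
decreasing_by omega

-- B's 'for i in range(nx)' loop over the columns, then the trailing while
def loopCols (nxI nyI sx sy : Int) : List Int → Int → Int → Int → List (Int × Int)
  | [], x, y, j => (loopVert sy x y j nyI).1
  | i :: rest, x, y, j =>
    let key := (2*i + 1) * nyI
    let jv := PySem.Int.floordiv (key + nxI - 1) (2*nxI)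
    let r := loopVert sy x y j jv
    if PySem.Int.mod key (2*nxI) = nxI then
      r.1 ++ (x + sx, r.2.1 + sy) :: loopCols nxI nyI sx sy rest (x + sx) (r.2.1 + sy) (r.2.2 + 1)
    else
      r.1 ++ (x + sx, r.2.1) :: loopCols nxI nyI sx sy rest (x + sx) r.2.1 r.2.2

def supercover_line_alt (p0 : Int × Int) (p1 : Int × Int) : List (Int × Int) :=
  let dx := p1.1 - p0.1
  let dy := p1.2 - p0.2
  let nx := dx.natAbs
  let ny := dy.natAbs
  let sign_x : Int := if dx > 0 then 1 else -1
  let sign_y : Int := if dy > 0 then 1 else -1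
  loopCols (nx:Int) (ny:Int) sign_x sign_y (PySem.List.pyRange 0 (nx:Int) 1) p0.1 p0.2 0

-- ===== PRECONDITION & SPEC =====
def Spec_supercover_line (p0 : Int × Int) (p1 : Int × Int) (out : List (Int × Int)) : Prop := out = supercover_line_alt p0 p1
instance (p0 : Int × Int) (p1 : Int × Int) (out : List (Int × Int)) : Decidable (Spec_supercover_line p0 p1 out) := by unfold Spec_supercover_line; infer_instance

-- ===== CLAIM (what is proved, stated in full; the proofs are below) =====
def Claim_equal_supercover_line : Prop := ∀ (p0 : Int × Int) (p1 : Int × Int), Dom_supercover_line p0 p1 → Spec_supercover_line p0 p1 (supercover_line p0 p1)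

-- ===== LEMMAS AND PROOFS =====

-- Proof-side intermediate: the merge of the two sorted event-key lists
-- ((2i+1)*ny for vertical-line crossings, (2j+1)*nx for horizontal ones).
def mergeB (sx sy : Int) : List Int → List Int → Int → Int → List (Int × Int)
  | [], [], _, _ => []
  | h :: hs, v :: vs, x, y =>
    if h = v then (x + sx, y + sy) :: mergeB sx sy hs vs (x + sx) (y + sy)
    else if h < v then (x + sx, y) :: mergeB sx sy hs (v :: vs) (x + sx) y
    else (x, y + sy) :: mergeB sx sy (h :: hs) vs x (y + sy)
  | h :: hs, [], x, y => (x + sx, y) :: mergeB sx sy hs [] (x + sx) y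
  | [], v :: vs, x, y => (x, y + sy) :: mergeB sx sy [] vs x (y + sy)
termination_by hs vs => hs.length + vs.length

-- A's loop at counters (ix, iy), with enough fuel, equals the merge on the
-- event-key suffixes from ix and iy.
theorem loopA_eq_mergeB (nx ny : Nat) (sx sy : Int) :
    ∀ (fuel : Nat) (x y ix iy : Int), 0 ≤ ix → 0 ≤ iy →
    (((nx:Int) - ix).toNat + ((ny:Int) - iy).toNat) ≤ fuel →
    loopA nx ny sx sy fuel x y ix iy =
      mergeB sx sy
        ((PySem.List.pyRange ix (nx:Int) 1).map (fun i => (2*i + 1) * (ny:Int)))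
        ((PySem.List.pyRange iy (ny:Int) 1).map (fun j => (2*j + 1) * (nx:Int)))
        x y := by
  intro fuel
  induction fuel with
  | zero =>
    intro x y ix iy hix hiy hn
    have hx : ¬ ix < (nx:Int) := by omega
    have hy : ¬ iy < (ny:Int) := by omega
    have hhs : PySem.List.pyRange ix (nx:Int) 1 = [] := by
      simp [PySem.List.pyRange_one]; omega
    have hvs : PySem.List.pyRange iy (ny:Int) 1 = [] := by
      simp [PySem.List.pyRange_one]; omega
    rw [hhs, hvs]
    simp [loopA, mergeB]
  | succ fuel ih =>
    intro x y ix iy hix hiy hn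
    by_cases hg : ix < (nx:Int) ∨ iy < (ny:Int)
    · by_cases hx : ix < (nx:Int) <;> by_cases hy : iy < (ny:Int)
      · -- both lists nonempty: head comparison is exactly A's decision
        rw [PySem.List.pyRange_one_cons hx, PySem.List.pyRange_one_cons hy]
        rw [loopA]
        have e1 : (1 + 2*ix) * (ny:Int) = (2*ix + 1) * (ny:Int) := by ring
        have e2 : (1 + 2*iy) * (nx:Int) = (2*iy + 1) * (nx:Int) := by ring
        simp only [List.map_cons, mergeB, if_pos hg]
        by_cases he : (2*ix + 1) * (ny:Int) = (2*iy + 1) * (nx:Int)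
        · rw [if_pos he, if_pos (by omega : (1 + 2*ix) * (ny:Int) - (1 + 2*iy) * (nx:Int) = 0)]
          rw [ih _ _ _ _ (by omega) (by omega) (by omega)]
        · rw [if_neg he, if_neg (by omega : ¬((1 + 2*ix) * (ny:Int) - (1 + 2*iy) * (nx:Int) = 0))]
          by_cases hlt : (2*ix + 1) * (ny:Int) < (2*iy + 1) * (nx:Int)
          · rw [if_pos hlt, if_pos (by omega : (1 + 2*ix) * (ny:Int) - (1 + 2*iy) * (nx:Int) < 0)]
            rw [ih _ _ _ _ (by omega) hiy (by omega)]
            rw [PySem.List.pyRange_one_cons hy, List.map_cons]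
          · rw [if_neg hlt, if_neg (by omega : ¬((1 + 2*ix) * (ny:Int) - (1 + 2*iy) * (nx:Int) < 0))]
            rw [ih _ _ _ _ hix (by omega) (by omega)]
            rw [PySem.List.pyRange_one_cons hx, List.map_cons]
      · -- vs exhausted: A's decision is negative, both take a horizontal step
        have hvs : PySem.List.pyRange iy (ny:Int) 1 = [] := by
          simp [PySem.List.pyRange_one]; omega
        have hd : (1 + 2*ix) * (ny:Int) - (1 + 2*iy) * (nx:Int) < 0 := by
          push Not at hy
          nlinarith [mul_le_mul_of_nonneg_right hy (by positivity : (0:Int) ≤ 2*nx),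
            mul_le_mul_of_nonneg_right (by omega : ix + 1 ≤ (nx:Int)) (by positivity : (0:Int) ≤ 2*ny),
            (by omega : (1:Int) ≤ nx)]
        rw [hvs, PySem.List.pyRange_one_cons hx, loopA]
        simp only [List.map_cons, List.map_nil, mergeB, if_pos hg,
          if_neg (by omega : ¬((1 + 2*ix) * (ny:Int) - (1 + 2*iy) * (nx:Int) = 0)), if_pos hd]
        rw [ih _ _ _ _ (by omega) hiy (by omega), hvs, List.map_nil]
      · -- hs exhausted: A's decision is positive, both take a vertical step
        have hhs : PySem.List.pyRange ix (nx:Int) 1 = [] := by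
          simp [PySem.List.pyRange_one]; omega
        have hd : 0 < (1 + 2*ix) * (ny:Int) - (1 + 2*iy) * (nx:Int) := by
          push Not at hx
          nlinarith [mul_le_mul_of_nonneg_right hx (by positivity : (0:Int) ≤ 2*ny),
            mul_le_mul_of_nonneg_right (by omega : iy + 1 ≤ (ny:Int)) (by positivity : (0:Int) ≤ 2*nx),
            (by omega : (1:Int) ≤ ny)]
        rw [hhs, PySem.List.pyRange_one_cons hy, loopA]
        simp only [List.map_cons, List.map_nil, mergeB, if_pos hg,
          if_neg (by omega : ¬((1 + 2*ix) * (ny:Int) - (1 + 2*iy) * (nx:Int) = 0)),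
          if_neg (by omega : ¬((1 + 2*ix) * (ny:Int) - (1 + 2*iy) * (nx:Int) < 0))]
        rw [ih _ _ _ _ hix (by omega) (by omega), hhs, List.map_nil]
      · omega
    · have hhs : PySem.List.pyRange ix (nx:Int) 1 = [] := by
        simp [PySem.List.pyRange_one]; omega
      have hvs : PySem.List.pyRange iy (ny:Int) 1 = [] := by
        simp [PySem.List.pyRange_one]; omega
      rw [loopA, if_neg hg, hhs, hvs]
      simp [mergeB]

-- characterization of B's closed-form jv = (key + nx - 1) // (2*nx)
theorem jv_lt_iff (nxI key j : Int) (hb : 0 < nxI) :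
    j < PySem.Int.floordiv (key + nxI - 1) (2*nxI) ↔ (2*j + 1) * nxI < key := by
  have h1 : j + 1 ≤ PySem.Int.floordiv (key + nxI - 1) (2*nxI) ↔ (j+1) * (2*nxI) ≤ key + nxI - 1 :=
    PySem.Int.le_floordiv_iff_mul_le (by omega)
  constructor
  · intro h
    have := h1.mp (by omega)
    nlinarith
  · intro h
    have h2 : (j+1) * (2*nxI) ≤ key + nxI - 1 := by nlinarith
    have := h1.mpr h2
    omega

-- modulus test detects exactly the diagonal crossing: key = (2*jv+1)*nx
theorem mod_diag_iff (nxI key : Int) (hb : 0 < nxI) :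
    PySem.Int.mod key (2*nxI) = nxI ↔ key = (2 * PySem.Int.floordiv (key + nxI - 1) (2*nxI) + 1) * nxI := by
  have hb2 : (0:Int) < 2*nxI := by omega
  have hkey := PySem.Int.floordiv_mul_add_mod key (2*nxI)
  constructor
  · intro hm
    rw [hm] at hkey
    have hq : PySem.Int.floordiv (key + nxI - 1) (2*nxI) = PySem.Int.floordiv key (2*nxI) := by
      rw [PySem.Int.floordiv_eq_iff_of_pos hb2]
      constructor <;> nlinarith
    rw [hq]
    linear_combination -hkey
  · intro h
    have hq : PySem.Int.floordiv key (2*nxI) = PySem.Int.floordiv (key + nxI - 1) (2*nxI) := by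
      rw [PySem.Int.floordiv_eq_iff_of_pos hb2]
      constructor <;> nlinarith
    rw [hq] at hkey
    linear_combination hkey + h

-- state returned by the inner while loop
theorem loopVert_snd (sy x : Int) : ∀ (k : Nat) (y j : Int),
    (loopVert sy x y j (j + k)).2 = (y + sy * k, j + k) := by
  intro k
  induction k with
  | zero => intro y j; rw [loopVert]; simp
  | succ k ih =>
    intro y j
    rw [loopVert]
    have hlt : j < j + ((k:Int) + 1) := by omega
    have e : j + (((k:Nat):Int) + 1) = (j + 1) + (k:Nat) := by ring
    push_cast
    rw [if_pos hlt, e, ih]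
    rw [Prod.mk.injEq]
    exact ⟨by ring, rfl⟩

-- the inner while run, mirrored on the merge side
theorem mergeB_run (nxI nyI sx sy key : Int) (hs : List Int) :
    ∀ (k : Nat) (j x y jv : Int), jv = j + k → jv ≤ nyI →
    (∀ j', j ≤ j' → j' < jv → (2*j' + 1) * nxI < key) →
    mergeB sx sy (key :: hs) ((PySem.List.pyRange j nyI 1).map (fun t => (2*t + 1) * nxI)) x y
      = (loopVert sy x y j jv).1 ++
        mergeB sx sy (key :: hs) ((PySem.List.pyRange jv nyI 1).map (fun t => (2*t + 1) * nxI)) x (y + sy * k) := by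
  intro k
  induction k with
  | zero =>
    intro j x y jv hjv hle hlt
    rw [loopVert]
    simp [hjv]
  | succ k ih =>
    intro j x y jv hjv hle hlt
    have hjlt : j < jv := by omega
    have hv : (2*j + 1) * nxI < key := hlt j le_rfl hjlt
    rw [PySem.List.pyRange_one_cons (by omega), List.map_cons, loopVert, if_pos hjlt]
    simp only [mergeB, if_neg (by omega : ¬ key = (2*j + 1) * nxI),
      if_neg (by omega : ¬ key < (2*j + 1) * nxI)]
    rw [ih (j+1) x (y + sy) jv (by push_cast at hjv ⊢; omega) hle
      (fun j' h1 h2 => hlt j' (by omega) h2)]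
    simp only [List.cons_append]
    congr 1
    push_cast
    ring_nf

-- the trailing while loop, mirrored on the merge side
theorem mergeB_tail (nxI nyI sx sy : Int) :
    ∀ (k : Nat) (j x y : Int), nyI = j + k →
    mergeB sx sy [] ((PySem.List.pyRange j nyI 1).map (fun t => (2*t + 1) * nxI)) x y
      = (loopVert sy x y j nyI).1 := by
  intro k
  induction k with
  | zero =>
    intro j x y hj
    rw [PySem.List.pyRange_one_eq_nil (by omega), loopVert]
    simp [mergeB, hj]
  | succ k ih =>
    intro j x y hj
    rw [PySem.List.pyRange_one_cons (by omega), List.map_cons, loopVert,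
      if_pos (by omega : j < nyI)]
    simp only [mergeB]
    rw [ih (j+1) x (y + sy) (by push_cast at hj ⊢; omega)]

-- main bridge: the merge equals B's column loop
theorem mergeB_eq_loopCols (nxI nyI sx sy : Int) (hnx : 0 ≤ nxI) (hny : 0 ≤ nyI) :
    ∀ (N : Nat) (ix j x y : Int), 0 ≤ ix → ix ≤ nxI → 0 ≤ j → j ≤ nyI →
    (ix < nxI → (2*j - 1) * nxI < (2*ix + 1) * nyI) →
    ((nxI - ix).toNat + (nyI - j).toNat ≤ N) →
    mergeB sx sy ((PySem.List.pyRange ix nxI 1).map (fun i => (2*i + 1) * nyI))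
                 ((PySem.List.pyRange j nyI 1).map (fun t => (2*t + 1) * nxI)) x y
      = loopCols nxI nyI sx sy (PySem.List.pyRange ix nxI 1) x y j := by
  intro N
  induction N with
  | zero =>
    intro ix j x y h0ix hixn h0j hjn hinv hm
    rw [PySem.List.pyRange_one_eq_nil (by omega)]
    simp only [List.map_nil, loopCols]
    exact mergeB_tail nxI nyI sx sy (nyI - j).toNat j x y (by omega)
  | succ N ih =>
    intro ix j x y h0ix hixn h0j hjn hinv hm
    by_cases hx : ix < nxI
    · have hbx : (0:Int) < nxI := by omega
      have hkeyinv : (2*(j-1) + 1) * nxI < (2*ix + 1) * nyI := by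
        have := hinv hx; nlinarith
      have hjjv : j ≤ (PySem.Int.floordiv ((2*ix + 1) * nyI + nxI - 1) (2*nxI)) := by
        have := (jv_lt_iff nxI ((2*ix + 1) * nyI) (j-1) hbx).mpr hkeyinv
        omega
      have hjvny : (PySem.Int.floordiv ((2*ix + 1) * nyI + nxI - 1) (2*nxI)) ≤ nyI := by
        by_contra hc
        push Not at hc
        have := (jv_lt_iff nxI ((2*ix + 1) * nyI) nyI hbx).mp hc
        nlinarith
      have hnotlt : ¬ ((2 * (PySem.Int.floordiv ((2*ix + 1) * nyI + nxI - 1) (2*nxI)) + 1) * nxI < (2*ix + 1) * nyI) := by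
        intro hc
        exact absurd ((jv_lt_iff nxI ((2*ix + 1) * nyI) ((PySem.Int.floordiv ((2*ix + 1) * nyI + nxI - 1) (2*nxI))) hbx).mpr hc) (lt_irrefl _)
      have hsnd := loopVert_snd sy x (((PySem.Int.floordiv ((2*ix + 1) * nyI + nxI - 1) (2*nxI))) - j).toNat y j
      have ejv : j + ((((PySem.Int.floordiv ((2*ix + 1) * nyI + nxI - 1) (2*nxI)) - j).toNat : Nat) : Int) = (PySem.Int.floordiv ((2*ix + 1) * nyI + nxI - 1) (2*nxI)) := by omega
      rw [ejv] at hsnd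
      rw [PySem.List.pyRange_one_cons hx, List.map_cons]
      rw [mergeB_run nxI nyI sx sy ((2*ix + 1) * nyI)
        ((PySem.List.pyRange (ix+1) nxI 1).map (fun i => (2*i + 1) * nyI))
        (((PySem.Int.floordiv ((2*ix + 1) * nyI + nxI - 1) (2*nxI))) - j).toNat j x y ((PySem.Int.floordiv ((2*ix + 1) * nyI + nxI - 1) (2*nxI))) (by omega) hjvny
        (fun j' _ h2 => (jv_lt_iff nxI ((2*ix + 1) * nyI) j' hbx).mp h2)]
      simp only [loopCols]
      by_cases hdiag : PySem.Int.mod ((2*ix + 1) * nyI) (2*nxI) = nxI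
      · have hdeq : (2*ix + 1) * nyI = (2 * (PySem.Int.floordiv ((2*ix + 1) * nyI + nxI - 1) (2*nxI)) + 1) * nxI :=
          (mod_diag_iff nxI ((2*ix + 1) * nyI) hbx).mp hdiag
        have hny0 : 0 < nyI := by nlinarith
        have hjvlt : (PySem.Int.floordiv ((2*ix + 1) * nyI + nxI - 1) (2*nxI)) < nyI := by
          rcases lt_or_eq_of_le hjvny with h | h
          · exact h
          · exfalso; rw [h] at hdeq; nlinarith
        rw [PySem.List.pyRange_one_cons hjvlt, List.map_cons]
        simp only [mergeB, if_pos hdeq, if_pos hdiag, hsnd]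
        congr 1
        rw [ih (ix+1) ((PySem.Int.floordiv ((2*ix + 1) * nyI + nxI - 1) (2*nxI)) + 1) (x + sx) (y + sy * (((PySem.Int.floordiv ((2*ix + 1) * nyI + nxI - 1) (2*nxI))) - j).toNat + sy)
          (by omega) (by omega) (by omega) (by omega)
          (by intro _; nlinarith) (by omega)]
      · have hne : (2*ix + 1) * nyI ≠ (2 * (PySem.Int.floordiv ((2*ix + 1) * nyI + nxI - 1) (2*nxI)) + 1) * nxI := by
          intro hc
          exact hdiag ((mod_diag_iff nxI ((2*ix + 1) * nyI) hbx).mpr hc)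
        have hlt2 : (2*ix + 1) * nyI < (2 * (PySem.Int.floordiv ((2*ix + 1) * nyI + nxI - 1) (2*nxI)) + 1) * nxI := by omega
        have hinv' : ix + 1 < nxI → (2 * (PySem.Int.floordiv ((2*ix + 1) * nyI + nxI - 1) (2*nxI)) - 1) * nxI < (2*(ix+1) + 1) * nyI := by
          intro _
          by_cases hjv0 : (PySem.Int.floordiv ((2*ix + 1) * nyI + nxI - 1) (2*nxI)) ≤ 0
          · nlinarith
          · have := (jv_lt_iff nxI ((2*ix + 1) * nyI) ((PySem.Int.floordiv ((2*ix + 1) * nyI + nxI - 1) (2*nxI)) - 1) hbx).mpr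
            have h2 : (2*((PySem.Int.floordiv ((2*ix + 1) * nyI + nxI - 1) (2*nxI)) - 1) + 1) * nxI < (2*ix + 1) * nyI :=
              (jv_lt_iff nxI ((2*ix + 1) * nyI) ((PySem.Int.floordiv ((2*ix + 1) * nyI + nxI - 1) (2*nxI)) - 1) hbx).mp (by omega)
            nlinarith
        rcases lt_or_eq_of_le hjvny with hjvlt | hjveq
        · have hvs : (PySem.List.pyRange (PySem.Int.floordiv ((2*ix + 1) * nyI + nxI - 1) (2*nxI)) nyI 1).map (fun t => (2*t + 1) * nxI)
              = (2 * (PySem.Int.floordiv ((2*ix + 1) * nyI + nxI - 1) (2*nxI)) + 1) * nxI :: (PySem.List.pyRange ((PySem.Int.floordiv ((2*ix + 1) * nyI + nxI - 1) (2*nxI)) + 1) nyI 1).map (fun t => (2*t + 1) * nxI) := by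
            rw [PySem.List.pyRange_one_cons hjvlt, List.map_cons]
          rw [hvs]
          simp only [mergeB, if_neg hne, if_pos hlt2, if_neg hdiag, hsnd]
          rw [← hvs]
          congr 1
          congr 1
          exact ih (ix+1) (PySem.Int.floordiv ((2*ix + 1) * nyI + nxI - 1) (2*nxI)) (x + sx) (y + sy * ((PySem.Int.floordiv ((2*ix + 1) * nyI + nxI - 1) (2*nxI)) - j).toNat)
            (by omega) (by omega) (by omega) (by omega) hinv' (by omega)
        · have hvs : (PySem.List.pyRange (PySem.Int.floordiv ((2*ix + 1) * nyI + nxI - 1) (2*nxI)) nyI 1).map (fun t => (2*t + 1) * nxI)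
              = ([] : List Int) := by
            rw [PySem.List.pyRange_one_eq_nil (by omega), List.map_nil]
          rw [hvs]
          simp only [mergeB, if_neg hdiag, hsnd]
          congr 1
          congr 1
          have hrec := ih (ix+1) (PySem.Int.floordiv ((2*ix + 1) * nyI + nxI - 1) (2*nxI)) (x + sx) (y + sy * ((PySem.Int.floordiv ((2*ix + 1) * nyI + nxI - 1) (2*nxI)) - j).toNat)
            (by omega) (by omega) (by omega) (by omega) hinv' (by omega)
          rw [hvs] at hrec
          exact hrec
    · rw [PySem.List.pyRange_one_eq_nil (by omega)]
      simp only [List.map_nil, loopCols]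
      exact mergeB_tail nxI nyI sx sy (nyI - j).toNat j x y (by omega)

-- ===== VERDICT (by name: the statement is the Claim_ definition above) =====
theorem supercover_line_spec : Claim_equal_supercover_line := by
  intro p0 p1 _
  unfold Spec_supercover_line supercover_line supercover_line_alt
  rw [loopA_eq_mergeB _ _ _ _ _ _ _ 0 0 le_rfl le_rfl (by omega)]
  exact mergeB_eq_loopCols _ _ _ _ (by positivity) (by positivity)
    (((_:Int) - 0).toNat + ((_:Int) - 0).toNat) 0 0 _ _ le_rfl (by positivity) le_rfl (by positivity)
    (by intro h; nlinarith) le_rfl
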